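-- pv_equiv track=rewrite | github.com/zqp111/leetcode_everyday | src/649.dota-2-参议院.py | predictPartyVictory
-- ===== SOURCE A (Python) =====
-- def predictPartyVictory(senate: str) -> str:
--     R, D = [], []
--     length = len(senate)
--
--     for i, char in enumerate(senate):
--         if char == "R":
--             R.append(i)
--         else:
--             D.append(i)
--     while R and D:
--         if R[0] < D[0]:
--             R.append(R.pop(0) + length)
--             D.pop(0)
--         else:
--             D.append(D.pop(0) + length)
--             R.pop(0)
--     return "Radiant" if R else "Dire"
-- ===== SOURCE B (Python) =====
-- def predictPartyVictory(senate: str) -> str: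
--     # one queue of party characters: the front senator bans the nearest
--     # opposing senator still in the queue, then goes to the back
--     q = list(senate)
--     while any(c == 'R' for c in q) and any(c != 'R' for c in q):
--         c = q.pop(0)
--         for j, d in enumerate(q):
--             if (d == 'R') != (c == 'R'):
--                 q.pop(j)
--                 break
--         q.append(c)
--     return "Radiant" if q and q[0] == 'R' else "Dire"
-- ===== Notes on version B (the rewrite author's own statement) =====
-- stated objective: simpler
-- what changed: Replaces the two integer index queues with the +length reinsertion trick by a single queue of party characters where the front senator bans the nearest opposing senator and rotates to the back.
import Mathlib
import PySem

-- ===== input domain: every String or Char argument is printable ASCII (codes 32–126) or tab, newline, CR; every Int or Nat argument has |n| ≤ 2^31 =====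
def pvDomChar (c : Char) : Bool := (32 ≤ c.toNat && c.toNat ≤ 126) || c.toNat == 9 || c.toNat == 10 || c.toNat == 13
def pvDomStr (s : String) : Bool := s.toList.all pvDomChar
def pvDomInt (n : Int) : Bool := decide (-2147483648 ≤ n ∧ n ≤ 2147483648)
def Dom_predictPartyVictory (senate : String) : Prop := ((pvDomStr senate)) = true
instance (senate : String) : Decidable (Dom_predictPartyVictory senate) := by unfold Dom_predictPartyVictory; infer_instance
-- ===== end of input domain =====

-- B replaces A's two index queues and +length reinsertion by a single queue of
-- party characters (front senator bans the nearest opposing senator, then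
-- rotates to the back); same cost, shorter and plainer.

-- ===== PORT A =====
-- the for-loop building the two index queues (R.append(i) / D.append(i))
def pvABuild : List (Int × Char) → List Int → List Int → List Int × List Int
  | [], R, D => (R, D)
  | (i, c) :: rest, R, D =>
      if c == 'R' then pvABuild rest (R ++ [i]) D
      else pvABuild rest R (D ++ [i])

-- the while loop: while R and D: …
def pvALoop (L : Int) : List Int → List Int → List Int × List Int
  | r :: rt, d :: dt =>
      if r < d then pvALoop L (rt ++ [r + L]) dt
      else pvALoop L rt (dt ++ [d + L])
  | R, D => (R, D)
termination_by R D => R.length + D.length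
decreasing_by all_goals (simp; try omega)

def predictPartyVictory (senate : String) : String :=
  let length := PySem.Str.len senate
  let RD := pvABuild (PySem.List.enumerate senate.toList 0) [] []
  let RD' := pvALoop length RD.1 RD.2
  match RD'.1 with
  | _ :: _ => "Radiant"
  | [] => "Dire"

-- ===== PORT B =====
-- the inner for/break: pop the first senator of the party opposite to c
def pvRemoveOpp (c : Char) : List Char → List Char
  | [] => []
  | d :: ds => if (d == 'R') != (c == 'R') then ds else d :: pvRemoveOpp c ds

theorem pvRemoveOpp_length_lt (c : Char) (l : List Char)
    (h : ∃ d ∈ l, ((d == 'R') != (c == 'R')) = true) :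
    (pvRemoveOpp c l).length < l.length := by
  induction l with
  | nil => simp at h
  | cons d ds ih =>
      simp only [pvRemoveOpp]
      by_cases hd : ((d == 'R') != (c == 'R')) = true
      · simp [hd]
      · simp only [hd, if_neg]
        simp only [List.mem_cons] at h
        obtain ⟨e, he, hp⟩ := h
        rcases he with rfl | he
        · exact absurd hp hd
        · have := ih ⟨e, he, hp⟩
          simp [hd]
          omega

-- the while loop on the single queue
def pvBLoop : List Char → List Char
  | [] => []
  | c :: rest =>
      if h : ((c :: rest).any (fun x => x == 'R') && (c :: rest).any (fun x => x != 'R')) = true then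
        pvBLoop (pvRemoveOpp c rest ++ [c])
      else c :: rest
termination_by q => q.length
decreasing_by
  simp only [List.length_append, List.length_cons, List.length_nil]
  have : ∃ d ∈ rest, ((d == 'R') != (c == 'R')) = true := by
    simp only [Bool.and_eq_true, List.any_eq_true] at h
    obtain ⟨⟨r, hr, hrR⟩, ⟨d, hd, hdD⟩⟩ := h
    by_cases hc : (c == 'R') = true
    · rcases List.mem_cons.1 hd with h1 | h1
      · subst h1; simp_all
      · exact ⟨d, h1, by simp_all⟩
    · rcases List.mem_cons.1 hr with h1 | h1
      · subst h1; simp_all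
      · exact ⟨r, h1, by simp_all⟩
  have := pvRemoveOpp_length_lt c rest this
  omega

def predictPartyVictory_alt (senate : String) : String :=
  match pvBLoop senate.toList with
  | c :: _ => if c == 'R' then "Radiant" else "Dire"
  | [] => "Dire"

-- ===== PRECONDITION & SPEC =====
def Spec_predictPartyVictory (senate : String) (out : String) : Prop := out = predictPartyVictory_alt senate
instance (senate : String) (out : String) : Decidable (Spec_predictPartyVictory senate out) := by unfold Spec_predictPartyVictory; infer_instance

-- ===== CLAIM (what is proved, stated in full; the proofs are below) =====
def Claim_equal_predictPartyVictory : Prop := ∀ (senate : String), Dom_predictPartyVictory senate → Spec_predictPartyVictory senate (predictPartyVictory senate)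

-- ===== LEMMAS AND PROOFS =====

-- ghost loop on (index, char) pairs, mirroring pvBLoop; proof-only helpers
def pvRemoveFirst {A : Type} (p : A → Bool) : List A → List A
  | [] => []
  | d :: ds => if p d then ds else d :: pvRemoveFirst p ds

theorem pvRemoveFirst_length_lt {A : Type} (p : A → Bool) (l : List A)
    (h : ∃ d ∈ l, p d = true) :
    (pvRemoveFirst p l).length < l.length := by
  induction l with
  | nil => simp at h
  | cons d ds ih =>
      simp only [pvRemoveFirst]
      by_cases hd : p d = true
      · simp [hd]
      · simp only [hd]
        simp only [List.mem_cons] at h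
        obtain ⟨e, he, hp⟩ := h
        rcases he with rfl | he
        · exact absurd hp hd
        · have := ih ⟨e, he, hp⟩
          simp [hd]; omega

theorem pvRemoveFirst_sublist {A : Type} (p : A → Bool) (l : List A) :
    (pvRemoveFirst p l).Sublist l := by
  induction l with
  | nil => simp [pvRemoveFirst]
  | cons d ds ih =>
      simp only [pvRemoveFirst]
      by_cases hd : p d = true
      · simp [hd]
      · simpa [hd] using ih.cons₂ d

theorem pvRemoveFirst_filter_pos {A : Type} (q : A → Bool) (l : List A) :
    List.filter q (pvRemoveFirst q l) = (List.filter q l).tail := by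
  induction l with
  | nil => simp [pvRemoveFirst]
  | cons d ds ih =>
      by_cases hd : q d = true
      · simp [pvRemoveFirst, hd, List.filter_cons]
      · simp [pvRemoveFirst, hd, List.filter_cons, ih]

theorem pvRemoveFirst_filter_neg {A : Type} (q r : A → Bool)
    (hqr : ∀ x, r x = true → q x = false) (l : List A) :
    List.filter r (pvRemoveFirst q l) = List.filter r l := by
  induction l with
  | nil => simp [pvRemoveFirst]
  | cons d ds ih =>
      by_cases hd : q d = true
      · have : r d = false := by
          by_cases hr : r d = true
          · rw [hqr d hr] at hd; exact absurd hd (by simp)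
          · simpa using hr
        simp [pvRemoveFirst, hd, List.filter_cons, this]
      · simp [pvRemoveFirst, hd, List.filter_cons, ih]

def pvGhost (L : Int) : List (Int × Char) → List (Int × Char)
  | [] => []
  | c :: rest =>
      if h : ((c :: rest).any (fun x => x.2 == 'R') && (c :: rest).any (fun x => x.2 != 'R')) = true then
        pvGhost L (pvRemoveFirst (fun d => (d.2 == 'R') != (c.2 == 'R')) rest ++ [(c.1 + L, c.2)])
      else c :: rest
termination_by q => q.length
decreasing_by
  simp only [List.length_append, List.length_cons, List.length_nil]
  have : ∃ d ∈ rest, ((d.2 == 'R') != (c.2 == 'R')) = true := by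
    simp only [Bool.and_eq_true, List.any_eq_true] at h
    obtain ⟨⟨r, hr, hrR⟩, ⟨d, hd, hdD⟩⟩ := h
    by_cases hc : (c.2 == 'R') = true
    · rcases List.mem_cons.1 hd with h1 | h1
      · subst h1; simp_all
      · exact ⟨d, h1, by simp_all⟩
    · rcases List.mem_cons.1 hr with h1 | h1
      · subst h1; simp_all
      · exact ⟨r, h1, by simp_all⟩
  have := pvRemoveFirst_length_lt _ rest this
  omega

def pvInv (L : Int) (p : List (Int × Char)) : Prop :=
  p.Pairwise (fun a b => a.1 < b.1 ∧ b.1 < a.1 + L)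

theorem pvRemoveFirst_map_snd (e : Char) (l : List (Int × Char)) :
    (pvRemoveFirst (fun d => (d.2 == 'R') != (e == 'R')) l).map (·.2)
      = pvRemoveOpp e (l.map (·.2)) := by
  induction l with
  | nil => simp [pvRemoveFirst, pvRemoveOpp]
  | cons d ds ih =>
      by_cases hd : ((d.2 == 'R') != (e == 'R')) = true
      · simp [pvRemoveFirst, pvRemoveOpp, hd]
      · simp [pvRemoveFirst, pvRemoveOpp, hd, ih]

theorem pvGhost_map_snd (L : Int) (p : List (Int × Char)) :
    (pvGhost L p).map (·.2) = pvBLoop (p.map (·.2)) := by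
  fun_induction pvGhost L p with
  | case1 => simp [pvBLoop]
  | case2 c rest h ih =>
      have hg : ((c.2 :: rest.map (·.2)).any (fun x => x == 'R')
          && (c.2 :: rest.map (·.2)).any (fun x => x != 'R')) = true := by
        simpa [List.any_map, Function.comp] using h
      rw [ih]
      rw [show (c :: rest).map (·.2) = c.2 :: rest.map (·.2) by simp]
      rw [pvBLoop]
      rw [dif_pos hg]
      congr 1
      simp [pvRemoveFirst_map_snd]
  | case3 c rest h =>
      have hg : ¬ ((c.2 :: rest.map (·.2)).any (fun x => x == 'R')
          && (c.2 :: rest.map (·.2)).any (fun x => x != 'R')) = true := by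
        simpa [List.any_map, Function.comp] using h
      rw [show (c :: rest).map (·.2) = c.2 :: rest.map (·.2) by simp]
      rw [pvBLoop]
      rw [dif_neg hg]

theorem pvGhost_post (L : Int) (p : List (Int × Char)) :
    ¬ (((pvGhost L p).any (fun x => x.2 == 'R')) = true ∧ ((pvGhost L p).any (fun x => x.2 != 'R')) = true) := by
  fun_induction pvGhost L p with
  | case1 => simp
  | case2 c rest h ih => exact ih
  | case3 c rest h =>
      intro hcon
      exact h (by simp [hcon.1, hcon.2])

theorem pvInv_step (L : Int) (c : Int × Char) (rest : List (Int × Char))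
    (q : Int × Char → Bool) (hInv : pvInv L (c :: rest)) :
    pvInv L (pvRemoveFirst q rest ++ [(c.1 + L, c.2)]) := by
  unfold pvInv at *
  rcases List.pairwise_cons.1 hInv with ⟨hall, htail⟩
  have hsub := pvRemoveFirst_sublist q rest
  refine (List.pairwise_append).2 ⟨htail.sublist hsub, by simp, ?_⟩
  intro a ha b hb
  have ha' : a ∈ rest := hsub.mem ha
  have hb' : b = (c.1 + L, c.2) := by simpa using hb
  subst hb'
  have := hall a ha'
  exact ⟨by omega, by simp; omega⟩

theorem pvALoop_nil_left (L : Int) (D : List Int) : pvALoop L [] D = ([], D) := by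
  cases D <;> simp [pvALoop]

theorem pvALoop_nil_right (L : Int) (R : List Int) : pvALoop L R [] = (R, []) := by
  cases R <;> simp [pvALoop]

theorem pvGhost_sim (L : Int) : ∀ (n : Nat) (p : List (Int × Char)), p.length ≤ n → pvInv L p →
    pvALoop L ((p.filter (fun x => x.2 == 'R')).map (·.1))
              ((p.filter (fun x => !(x.2 == 'R'))).map (·.1))
      = (((pvGhost L p).filter (fun x => x.2 == 'R')).map (·.1),
         ((pvGhost L p).filter (fun x => !(x.2 == 'R'))).map (·.1)) := by
  intro n
  induction n with
  | zero =>
      intro p hlen _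
      have : p = [] := by cases p <;> simp_all
      subst this
      simp [pvGhost, pvALoop]
  | succ n ih =>
      intro p hlen hInv
      cases p with
      | nil => simp [pvGhost, pvALoop]
      | cons c rest =>
        by_cases hg : ((c :: rest).any (fun x => x.2 == 'R') && (c :: rest).any (fun x => x.2 != 'R')) = true
        · -- loop body fires on both sides
          have hstep : pvGhost L (c :: rest)
              = pvGhost L (pvRemoveFirst (fun d => (d.2 == 'R') != (c.2 == 'R')) rest ++ [(c.1 + L, c.2)]) := by
            rw [pvGhost]; rw [dif_pos hg]
          rcases List.pairwise_cons.1 hInv with ⟨hall, _⟩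
          simp only [Bool.and_eq_true, List.any_eq_true] at hg
          obtain ⟨⟨r, hrmem, hrR⟩, ⟨d, hdmem, hdD⟩⟩ := hg
          by_cases hc : (c.2 == 'R') = true
          · -- head is an R senator: A takes the r < d branch
            have hdrest : d ∈ rest := by
              rcases List.mem_cons.1 hdmem with h1 | h1
              · subst h1; simp_all
              · exact h1
            have hDne : rest.filter (fun x => !(x.2 == 'R')) ≠ [] := by
              intro hnil
              have := List.filter_eq_nil_iff.1 hnil d hdrest
              simp_all
            obtain ⟨d0, tD, hDeq⟩ := List.exists_cons_of_ne_nil hDne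
            have hd0rest : d0 ∈ rest := by
              have : d0 ∈ rest.filter (fun x => !(x.2 == 'R')) := by rw [hDeq]; simp
              exact List.mem_of_mem_filter this
            have hlt : c.1 < d0.1 := (hall d0 hd0rest).1
            set p' := pvRemoveFirst (fun d => (d.2 == 'R') != (c.2 == 'R')) rest ++ [(c.1 + L, c.2)] with hp'
            have hpred : (fun d : Int × Char => (d.2 == 'R') != (c.2 == 'R')) = (fun d : Int × Char => !(d.2 == 'R')) := by
              funext x; rw [hc]; simp [Bool.bne_true]
            have hfR : p'.filter (fun x => x.2 == 'R')
                = rest.filter (fun x => x.2 == 'R') ++ [(c.1 + L, c.2)] := by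
              rw [hp', List.filter_append, hpred]
              rw [pvRemoveFirst_filter_neg (fun x => !(x.2 == 'R')) (fun x => x.2 == 'R') (by intro x hx; simp_all) rest]
              simp [hc]
            have hfD : p'.filter (fun x => !(x.2 == 'R')) = tD := by
              rw [hp', List.filter_append, hpred]
              rw [pvRemoveFirst_filter_pos]
              simp [hc, hDeq]
            have hlen' : p'.length ≤ n := by
              have hex : ∃ x ∈ rest, ((x.2 == 'R') != (c.2 == 'R')) = true := by
                refine ⟨d, hdrest, by simp_all⟩
              have := pvRemoveFirst_length_lt _ rest hex
              simp only [hp', List.length_append, List.length_cons, List.length_nil]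
              simp only [List.length_cons] at hlen
              omega
            have hInv' : pvInv L p' := pvInv_step L c rest _ hInv
            have hrec := ih p' hlen' hInv'
            rw [hstep, ← hrec, hfR, hfD]
            rw [show (c :: rest).filter (fun x => x.2 == 'R') = c :: rest.filter (fun x => x.2 == 'R') from by simp [List.filter_cons, hc]]
            rw [show (c :: rest).filter (fun x => !(x.2 == 'R')) = rest.filter (fun x => !(x.2 == 'R')) from by simp [List.filter_cons, hc]]
            rw [hDeq]
            simp only [List.map_cons, List.map_append]
            simp only [pvALoop]
            simp [hlt]
          · -- head is a D senator: A takes the else branch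
            have hrrest : r ∈ rest := by
              rcases List.mem_cons.1 hrmem with h1 | h1
              · subst h1; simp_all
              · exact h1
            have hRne : rest.filter (fun x => x.2 == 'R') ≠ [] := by
              intro hnil
              have := List.filter_eq_nil_iff.1 hnil r hrrest
              simp_all
            obtain ⟨r0, tR, hReq⟩ := List.exists_cons_of_ne_nil hRne
            have hr0rest : r0 ∈ rest := by
              have : r0 ∈ rest.filter (fun x => x.2 == 'R') := by rw [hReq]; simp
              exact List.mem_of_mem_filter this
            have hlt : c.1 < r0.1 := (hall r0 hr0rest).1
            set p' := pvRemoveFirst (fun d => (d.2 == 'R') != (c.2 == 'R')) rest ++ [(c.1 + L, c.2)] with hp'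
            have hpred : (fun d : Int × Char => (d.2 == 'R') != (c.2 == 'R')) = (fun d : Int × Char => d.2 == 'R') := by
              funext x
              rw [show (c.2 == 'R') = false by simpa using hc]
              simp
            have hfR : p'.filter (fun x => x.2 == 'R') = tR := by
              rw [hp', List.filter_append, hpred]
              rw [pvRemoveFirst_filter_pos]
              simp [hc, hReq]
            have hfD : p'.filter (fun x => !(x.2 == 'R'))
                = rest.filter (fun x => !(x.2 == 'R')) ++ [(c.1 + L, c.2)] := by
              rw [hp', List.filter_append, hpred]
              rw [pvRemoveFirst_filter_neg (fun x => x.2 == 'R') (fun x => !(x.2 == 'R')) (by intro x hx; simp_all) rest]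
              simp [hc]
            have hlen' : p'.length ≤ n := by
              have hex : ∃ x ∈ rest, ((x.2 == 'R') != (c.2 == 'R')) = true := by
                refine ⟨r, hrrest, by simp_all⟩
              have := pvRemoveFirst_length_lt _ rest hex
              simp only [hp', List.length_append, List.length_cons, List.length_nil]
              simp only [List.length_cons] at hlen
              omega
            have hInv' : pvInv L p' := pvInv_step L c rest _ hInv
            have hrec := ih p' hlen' hInv'
            rw [hstep, ← hrec, hfR, hfD]
            rw [show (c :: rest).filter (fun x => x.2 == 'R') = rest.filter (fun x => x.2 == 'R') from by simp [List.filter_cons, hc]]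
            rw [show (c :: rest).filter (fun x => !(x.2 == 'R')) = c :: rest.filter (fun x => !(x.2 == 'R')) from by simp [List.filter_cons, hc]]
            rw [hReq]
            simp only [List.map_cons, List.map_append]
            simp only [pvALoop]
            have hnlt : ¬ (r0.1 < c.1) := by omega
            simp [hnlt]
        · -- loop ends on both sides
          have hstep : pvGhost L (c :: rest) = c :: rest := by
            rw [pvGhost]; rw [dif_neg hg]
          rw [hstep]
          simp only [Bool.and_eq_true, List.any_eq_true, not_and_or] at hg
          rcases hg with hg | hg
          · have hR : (c :: rest).filter (fun x => x.2 == 'R') = [] := by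
              rw [List.filter_eq_nil_iff]
              intro a ha
              push_neg at hg
              simpa using hg a ha
            rw [hR]
            simp [pvALoop_nil_left]
          · have hD : (c :: rest).filter (fun x => !(x.2 == 'R')) = [] := by
              rw [List.filter_eq_nil_iff]
              intro a ha
              push_neg at hg
              have := hg a ha
              simp_all
            rw [hD]
            simp [pvALoop_nil_right]

theorem pvEnum_inv (l : List Char) :
    pvInv ((l.length : Int)) (PySem.List.enumerate l 0) := by
  unfold pvInv
  have h1 : (PySem.List.enumerate l 0).Pairwise (fun a b => a.1 < b.1) :=
    PySem.List.pairwise_lt_enumerate l 0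
  have h2 : ∀ x ∈ PySem.List.enumerate l 0, 0 ≤ x.1 ∧ x.1 < (l.length : Int) := by
    intro x hx
    rw [PySem.List.mem_enumerate_iff] at hx
    obtain ⟨k, hk, rfl⟩ := hx
    constructor <;> simp <;> omega
  refine h1.imp_of_mem ?_
  intro a b ha hb hab
  have := h2 a ha
  have := h2 b hb
  exact ⟨hab, by omega⟩

theorem pvABuild_eq (l : List (Int × Char)) (R D : List Int) :
    pvABuild l R D = (R ++ (l.filter (fun x => x.2 == 'R')).map (·.1),
                      D ++ (l.filter (fun x => !(x.2 == 'R'))).map (·.1)) := by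
  induction l generalizing R D with
  | nil => simp [pvABuild]
  | cons x xs ih =>
      obtain ⟨i, c⟩ := x
      by_cases hc : (c == 'R') = true
      · simp [pvABuild, hc, ih, List.filter_cons]
      · simp [pvABuild, hc, ih, List.filter_cons]

-- ===== VERDICT (by name: the statement is the Claim_ definition above) =====
theorem predictPartyVictory_spec : Claim_equal_predictPartyVictory := by
  intro senate _
  unfold Spec_predictPartyVictory
  simp only [predictPartyVictory, predictPartyVictory_alt]
  rw [pvABuild_eq]
  simp only [List.nil_append]
  rw [show PySem.Str.len senate = ((senate.toList.length : Int)) from by simp [PySem.Str.len_eq]]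
  rw [pvGhost_sim ((senate.toList.length : Int)) (PySem.List.enumerate senate.toList 0).length
      (PySem.List.enumerate senate.toList 0) (le_refl _) (pvEnum_inv senate.toList)]
  have hB : pvBLoop senate.toList
      = (pvGhost ((senate.toList.length : Int)) (PySem.List.enumerate senate.toList 0)).map (·.2) := by
    rw [pvGhost_map_snd, PySem.List.map_snd_enumerate]
  rw [hB]
  dsimp only
  have hpost := pvGhost_post ((senate.toList.length : Int)) (PySem.List.enumerate senate.toList 0)
  set pF := pvGhost ((senate.toList.length : Int)) (PySem.List.enumerate senate.toList 0) with hpF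
  clear_value pF
  cases pF with
  | nil => simp
  | cons x t =>
      by_cases hx : (x.2 == 'R') = true
      · rw [show (x :: t).filter (fun x => x.2 == 'R') = x :: t.filter (fun x => x.2 == 'R') from by
              simp [List.filter_cons, hx]]
        simp [hx]
      · have hxit : (x.2 != 'R') = true := by simpa using hx
        have hanyD : ((x :: t).any (fun x => x.2 != 'R')) = true := by
          simp only [List.any_cons, hxit, Bool.true_or]
        have hanyR : ((x :: t).any (fun x => x.2 == 'R')) = false := by
          by_contra hcon
          have htrue : ((x :: t).any (fun x => x.2 == 'R')) = true := by
            revert hcon; cases ((x :: t).any (fun x => x.2 == 'R')) <;> simp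
          exact hpost ⟨htrue, hanyD⟩
        have hR : (x :: t).filter (fun x => x.2 == 'R') = [] := by
          rw [List.filter_eq_nil_iff]
          intro a ha
          have := List.any_eq_false.mp hanyR a ha
          simpa using this
        rw [hR]
        simp [hx]
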